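-- pv_equiv track=rewrite | github.com/avassdal/napalm_netgear | napalm_netgear/parser.py | parse_pipe_separated_table
-- ===== SOURCE A (Python) =====
-- from typing import Dict, List, Optional, Union, Any
--
-- def parse_pipe_separated_table(output: str, skip_patterns: List[str] = None) -> List[Dict[str, str]]:
--     """Parse a pipe-separated table output into a list of dictionaries.
--
--     Args:
--         output: String containing the table output
--         skip_patterns: List of patterns to skip lines (e.g. separators)
--
--     Returns:
--         List of dictionaries with field names as keys
--     """
--     if skip_patterns is None:
--         skip_patterns = []
--
--     results = []
--     headers = []
--
--     for line in output.splitlines():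
--         # Skip empty lines and lines matching skip patterns
--         if not line.strip() or any(pattern in line for pattern in skip_patterns):
--             continue
--
--         # Split line by pipe and strip whitespace
--         fields = [f.strip() for f in line.split("|") if f.strip()]
--
--         # First non-skipped line contains headers
--         if not headers:
--             headers = fields
--             continue
--
--         # Create dictionary from fields
--         if len(fields) == len(headers):
--             entry = dict(zip(headers, fields))
--             results.append(entry)
--
--     return results
-- ===== SOURCE B (Python) =====
-- def parse_pipe_separated_table(output, skip_patterns=None):
--     patterns = skip_patterns if skip_patterns is not None else []
--
--     # Pass 1: keep only useful lines, already parsed into stripped field lists.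
--     rows = []
--     for line in output.splitlines():
--         if line.strip() and not any(p in line for p in patterns):
--             rows.append([f.strip() for f in line.split("|") if f.strip()])
--
--     # Pass 2: the first non-empty field list is the header row; everything after
--     # it with a matching width becomes a record.
--     for i, fields in enumerate(rows):
--         if fields:
--             headers = fields
--             return [dict(zip(headers, r)) for r in rows[i + 1:] if len(r) == len(headers)]
--     return []
-- ===== Notes on version B (the rewrite author's own statement) =====
-- stated objective: simpler
-- what changed: Replaces A's single stateful loop (header flag + result accumulator) with a two-phase decomposition: first collect all parsed field-lists, then split them at the first non-empty one (the headers) and build the records from the tail with a comprehension.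
import Mathlib
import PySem

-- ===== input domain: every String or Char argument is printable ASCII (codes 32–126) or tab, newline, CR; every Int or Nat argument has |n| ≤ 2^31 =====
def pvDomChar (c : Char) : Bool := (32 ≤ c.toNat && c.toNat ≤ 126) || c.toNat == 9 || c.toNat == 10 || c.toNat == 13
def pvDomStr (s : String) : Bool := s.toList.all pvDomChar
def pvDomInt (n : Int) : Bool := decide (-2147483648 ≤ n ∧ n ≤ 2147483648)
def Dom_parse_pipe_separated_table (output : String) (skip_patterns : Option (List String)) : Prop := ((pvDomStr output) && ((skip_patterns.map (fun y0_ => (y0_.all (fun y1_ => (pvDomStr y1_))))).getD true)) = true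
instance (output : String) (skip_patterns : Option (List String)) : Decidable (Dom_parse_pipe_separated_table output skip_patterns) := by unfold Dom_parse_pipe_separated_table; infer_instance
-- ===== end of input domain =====

-- ===== PORT A =====
-- B replaces A's single stateful loop (header flag + accumulator) with a two-phase
-- split: collect parsed field-lists, then header = first non-empty one, records after it.

-- [f.strip() for f in line.split("|") if f.strip()]  (shared expression of both Pythons;
-- the separator "|" is non-empty, so split? is always `some` and getD never fires)
def pvFields (line : String) : List String :=
  (((PySem.Str.split? line "|").getD []).map PySem.Str.strip).filter (fun f => f ≠ "")

-- dict(zip(headers, fields)), returned as its items list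
def pvZipDict (headers fields : List String) : List (String × String) :=
  (PySem.Dict.ofList (headers.zip fields)).items

-- line.strip() and not any(pattern in line for pattern in skip_patterns)
def pvKeepB (patterns : List String) (line : String) : Bool :=
  PySem.Str.strip line ≠ "" && !(patterns.any (fun p => PySem.Str.isIn p line))

-- the body of A's for-loop, state = (results, headers)
def pvStepA (patterns : List String) (st : List (List (String × String)) × List String)
    (line : String) : List (List (String × String)) × List String :=
  if PySem.Str.strip line = "" ∨ patterns.any (fun p => PySem.Str.isIn p line) then st
  else
    let fields := pvFields line
    if st.2 = [] then (st.1, fields)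
    else if fields.length = st.2.length then (st.1 ++ [pvZipDict st.2 fields], st.2)
    else st

def parse_pipe_separated_table (output : String) (skip_patterns : Option (List String)) : List (List (String × String)) :=
  let patterns := skip_patterns.getD []
  ((PySem.Str.splitlines output).foldl (pvStepA patterns) ([], [])).1

-- ===== PORT B =====
-- the second loop of Source B: find the first non-empty field-list, build records from the tail
def pvRecords : List (List String) → List (List (String × String))
  | [] => []
  | fields :: rest =>
    if fields ≠ [] then
      (rest.filter (fun r => r.length = fields.length)).map (pvZipDict fields)
    else pvRecords rest

def parse_pipe_separated_table_alt (output : String) (skip_patterns : Option (List String)) : List (List (String × String)) :=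
  let patterns := skip_patterns.getD []
  let rows := ((PySem.Str.splitlines output).filter (pvKeepB patterns)).map pvFields
  pvRecords rows

-- ===== PRECONDITION & SPEC =====
def Spec_parse_pipe_separated_table (output : String) (skip_patterns : Option (List String)) (out : List (List (String × String))) : Prop := out = parse_pipe_separated_table_alt output skip_patterns
instance (output : String) (skip_patterns : Option (List String)) (out : List (List (String × String))) : Decidable (Spec_parse_pipe_separated_table output skip_patterns out) := by unfold Spec_parse_pipe_separated_table; infer_instance

-- ===== CLAIM (what is proved, stated in full; the proofs are below) =====
def Claim_equal_parse_pipe_separated_table : Prop := ∀ (output : String) (skip_patterns : Option (List String)), Dom_parse_pipe_separated_table output skip_patterns → Spec_parse_pipe_separated_table output skip_patterns (parse_pipe_separated_table output skip_patterns)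

-- ===== LEMMAS AND PROOFS =====
lemma pvKeepB_true (patterns : List String) (line : String)
    (hk : ¬ (PySem.Str.strip line = "" ∨ patterns.any (fun p => PySem.Str.isIn p line) = true)) :
    pvKeepB patterns line = true := by
  have h1 : ¬ PySem.Str.strip line = "" := fun h => hk (Or.inl h)
  have h2 : (patterns.any fun p => PySem.Str.isIn p line) = false := by
    cases hpa : (patterns.any fun p => PySem.Str.isIn p line) with
    | false => rfl
    | true => exact absurd (Or.inr hpa) hk
  unfold pvKeepB
  rw [h2]
  simp [h1]

lemma pvKeepB_false (patterns : List String) (line : String)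
    (hk : PySem.Str.strip line = "" ∨ patterns.any (fun p => PySem.Str.isIn p line) = true) :
    pvKeepB patterns line = false := by
  rcases hk with h | h
  · unfold pvKeepB; rw [h]; simp
  · unfold pvKeepB; rw [h]; simp

-- once headers ≠ [], A's loop just filters on width and zips
lemma foldA_ne (patterns : List String) (lines : List String)
    (res : List (List (String × String))) (headers : List String) (h : headers ≠ []) :
    (lines.foldl (pvStepA patterns) (res, headers)).1 =
      res ++ (((lines.filter (pvKeepB patterns)).map pvFields).filter
        (fun r => r.length = headers.length)).map (pvZipDict headers) := by
  induction lines generalizing res with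
  | nil => simp
  | cons line rest ih =>
    by_cases hk : PySem.Str.strip line = "" ∨ patterns.any (fun p => PySem.Str.isIn p line) = true
    · rw [List.foldl_cons, List.filter_cons]
      have h1 : pvStepA patterns (res, headers) line = (res, headers) := by
        unfold pvStepA; rw [if_pos hk]
      rw [h1, pvKeepB_false patterns line hk, ih res]
      simp
    · have hkb := pvKeepB_true patterns line hk
      by_cases hl : (pvFields line).length = headers.length
      · have h1 : pvStepA patterns (res, headers) line
            = (res ++ [pvZipDict headers (pvFields line)], headers) := by
          unfold pvStepA; rw [if_neg hk]; simp only [if_neg h, if_pos hl]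
        rw [List.foldl_cons, h1, ih, List.filter_cons, if_pos hkb, List.map_cons,
          List.filter_cons]
        simp [hl]
      · have h1 : pvStepA patterns (res, headers) line = (res, headers) := by
          unfold pvStepA; rw [if_neg hk]; simp only [if_neg h, if_neg hl]
        rw [List.foldl_cons, h1, ih, List.filter_cons, if_pos hkb, List.map_cons,
          List.filter_cons]
        simp [hl]

-- while headers = [], A's loop computes B's header-then-rows split
lemma foldA_nil (patterns : List String) (lines : List String)
    (res : List (List (String × String))) :
    (lines.foldl (pvStepA patterns) (res, [])).1 =
      res ++ pvRecords ((lines.filter (pvKeepB patterns)).map pvFields) := by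
  induction lines generalizing res with
  | nil => simp [pvRecords]
  | cons line rest ih =>
    by_cases hk : PySem.Str.strip line = "" ∨ patterns.any (fun p => PySem.Str.isIn p line) = true
    · rw [List.foldl_cons, List.filter_cons]
      have h1 : pvStepA patterns (res, []) line = (res, []) := by
        unfold pvStepA; rw [if_pos hk]
      rw [h1, pvKeepB_false patterns line hk]
      exact ih res
    · have hkb := pvKeepB_true patterns line hk
      rw [List.foldl_cons, List.filter_cons, if_pos hkb, List.map_cons]
      by_cases hf : pvFields line = []
      · have h1 : pvStepA patterns (res, []) line = (res, []) := by
          unfold pvStepA; rw [if_neg hk]; simp [hf]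
        rw [h1, ih res, hf]
        simp [pvRecords]
      · have h1 : pvStepA patterns (res, []) line = (res, pvFields line) := by
          unfold pvStepA; rw [if_neg hk]; simp
        rw [h1, foldA_ne patterns rest res (pvFields line) hf]
        simp [pvRecords, hf]

-- ===== VERDICT (by name: the statement is the Claim_ definition above) =====
theorem parse_pipe_separated_table_spec : Claim_equal_parse_pipe_separated_table := by
  intro output skip_patterns _
  unfold Spec_parse_pipe_separated_table parse_pipe_separated_table parse_pipe_separated_table_alt
  exact foldA_nil (skip_patterns.getD []) (PySem.Str.splitlines output) []
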